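-- pv_equiv track=rewrite | github.com/stnxo2023/garak | garak/probes/badchars.py | _apply_swaps
-- ===== SOURCE A (Python) =====
-- from dataclasses import dataclass
-- from typing import Iterator, List, Sequence, Tuple
--
-- BIDI_CONTROLS = {
--     "PDF": "\u202c",
--     "LRO": "\u202d",
--     "RLO": "\u202e",
--     "LRI": "\u2066",
--     "RLI": "\u2067",
--     "PDI": "\u2069",
-- }
--
-- @dataclass(frozen=True)
-- class _Swap:
--     """Represents a bidi-wrapped swap request between two code points."""
--
--     first: str
--     second: str
--
-- def _render_swaps(elements: Sequence) -> str:
--     """Recursively expand swap objects into bidi control sequences.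
--
--     The sequence mirrors the bidi swap function from Boucher et al.
--     ("Bad Characters," arXiv:2106.09898) and the imperceptible reference
--     implementation: it forces two adjacent code points to render in reverse
--     order while containing all directionality side effects.
--     """
--
--     rendered: List[str] = []
--     for element in elements:
--         if isinstance(element, _Swap):
--             payload = [
--                 BIDI_CONTROLS["LRO"],
--                 BIDI_CONTROLS["LRI"],
--                 BIDI_CONTROLS["RLO"],
--                 BIDI_CONTROLS["LRI"],
--                 element.first,
--                 BIDI_CONTROLS["PDI"],
--                 BIDI_CONTROLS["LRI"],
--                 element.second,
--                 BIDI_CONTROLS["PDI"],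
--                 BIDI_CONTROLS["PDF"],
--                 BIDI_CONTROLS["PDI"],
--                 BIDI_CONTROLS["PDF"],
--             ]
--             rendered.append(_render_swaps(payload))
--         elif isinstance(element, str):
--             rendered.append(element)
--         elif isinstance(element, Sequence):
--             rendered.append(_render_swaps(element))
--         else:
--             rendered.append(str(element))
--     return "".join(rendered)
--
-- def _apply_swaps(payload: str, indices: Sequence[int]) -> str:
--     working: List = list(payload)
--     swaps_done = 0
--     for original_idx in sorted(indices):
--         adjusted = original_idx - swaps_done
--         if adjusted < 0 or adjusted >= len(working) - 1:
--             continue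
--         first, second = working[adjusted], working[adjusted + 1]
--         working = (
--             working[:adjusted] + [_Swap(second, first)] + working[adjusted + 2 :]
--         )
--         swaps_done += 1
--     return _render_swaps(working)
-- ===== SOURCE B (Python) =====
-- def _apply_swaps(payload, indices):
--     # Single forward pass: rendered strings are built directly (no _Swap tree,
--     # no recursive render), chars are pulled in lazily and each splice happens
--     # near the end of `out`, instead of re-slicing the whole list per swap.
--     chars = list(payload)
--     n = len(chars)
--     out = []
--     next_i = 0
--     done = 0
--     for idx in sorted(indices):
--         a = idx - done
--         if a < 0 or a >= len(out) + (n - next_i) - 1: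
--             continue
--         need = a + 2 - len(out)
--         if need > 0:
--             out.extend(chars[next_i:next_i + need])
--             next_i += need
--         first, second = out[a], out[a + 1]
--         out[a:a + 2] = [
--             "\u202d\u2066\u202e\u2066" + second + "\u2069\u2066" + first
--             + "\u2069\u202c\u2069\u202c"
--         ]
--         done += 1
--     return "".join(out + chars[next_i:])
-- ===== Notes on version B (the rewrite author's own statement) =====
-- stated objective: faster
-- what changed: B makes one forward pass over the sorted indices building rendered bidi-wrap strings directly in a lazily-extended output list spliced near its end, instead of A's per-swap full-list re-slicing into _Swap tree nodes followed by a recursive render pass.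
import Mathlib
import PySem

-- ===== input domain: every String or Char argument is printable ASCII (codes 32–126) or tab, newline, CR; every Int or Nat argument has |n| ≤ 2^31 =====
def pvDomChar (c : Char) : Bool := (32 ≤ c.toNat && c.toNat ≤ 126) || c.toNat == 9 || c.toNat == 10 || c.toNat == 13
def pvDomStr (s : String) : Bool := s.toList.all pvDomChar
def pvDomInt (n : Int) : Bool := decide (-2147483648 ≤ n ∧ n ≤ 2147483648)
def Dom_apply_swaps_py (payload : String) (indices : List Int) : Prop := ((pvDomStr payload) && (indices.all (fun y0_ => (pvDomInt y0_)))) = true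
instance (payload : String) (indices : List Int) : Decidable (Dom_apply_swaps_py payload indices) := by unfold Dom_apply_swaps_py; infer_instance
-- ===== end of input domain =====

-- B replaces A's per-swap full-list re-slicing into _Swap tree nodes plus a recursive
-- render pass by a single forward pass that builds the rendered strings directly
-- (objective: faster — one pass and O(1)-area splices instead of O(n) re-slicing per swap).

-- ===== PORT A =====
-- the six bidi control characters (as singleton char lists; strings are ported as List Char)
def pvPDF : List Char := ['\u202C']
def pvLRO : List Char := ['\u202D']
def pvRLO : List Char := ['\u202E']
def pvLRI : List Char := ['\u2066']
def pvPDI : List Char := ['\u2069']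

-- an element of A's `working` list: a str, or a _Swap whose fields are again elements
inductive PVElem where
  | str : List Char → PVElem
  | swp : PVElem → PVElem → PVElem
deriving DecidableEq, Repr

-- _render_swaps applied to a list concatenates, per element, either the string itself
-- or the 12-part bidi payload with the two fields rendered recursively; this is that
-- concatenation, element by element.
def renderElem : PVElem → List Char
  | .str s => s
  | .swp f s =>
      pvLRO ++ pvLRI ++ pvRLO ++ pvLRI ++ renderElem f ++ pvPDI ++ pvLRI ++
        renderElem s ++ pvPDI ++ pvPDF ++ pvPDI ++ pvPDF

-- one iteration of A's `for original_idx in sorted(indices)` loop over (working, swaps_done)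
def pvStepA (st : List PVElem × Int) (idx : Int) : List PVElem × Int :=
  let working := st.1
  let adjusted := idx - st.2
  if adjusted < 0 ∨ adjusted ≥ (working.length : Int) - 1 then st
  else
    let first := PySem.List.pyGetD working adjusted (.str [])
    let second := PySem.List.pyGetD working (adjusted + 1) (.str [])
    (PySem.List.slice working none (some adjusted) ++ [.swp second first] ++
       PySem.List.slice working (some (adjusted + 2)) none,
     st.2 + 1)

def apply_swaps_py (payload : String) (indices : List Int) : String :=
  let working0 : List PVElem := payload.toList.map (fun c => .str [c])
  let res := (PySem.List.sorted indices (fun x => x) false).foldl pvStepA (working0, 0)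
  String.ofList (PySem.Chars.join [] (res.1.map renderElem))

-- ===== PORT B =====
-- the rendered bidi wrap "prefix + second + mid + first + suffix" built in Source B
def pvWrap (first second : List Char) : List Char :=
  pvLRO ++ pvLRI ++ pvRLO ++ pvLRI ++ second ++ pvPDI ++ pvLRI ++ first ++
    pvPDI ++ pvPDF ++ pvPDI ++ pvPDF

-- one iteration of Source B's loop over (out, next_i, done); chars[next_i:next_i+need]
-- with 0 ≤ next_i and 0 < need is exactly (chars.drop next).take need.toNat
def pvStepB (chars : List Char) (st : List (List Char) × Nat × Int) (idx : Int) :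
    List (List Char) × Nat × Int :=
  let out := st.1
  let next := st.2.1
  let a := idx - st.2.2
  if a < 0 ∨ a ≥ (out.length : Int) + ((chars.length : Int) - (next : Int)) - 1 then st
  else
    let need : Int := a + 2 - out.length
    let out' := if 0 < need then out ++ ((chars.drop next).take need.toNat).map (fun c => [c]) else out
    let next' := if 0 < need then next + need.toNat else next
    let first := PySem.List.pyGetD out' a []
    let second := PySem.List.pyGetD out' (a + 1) []
    (out'.take a.toNat ++ [pvWrap first second] ++ out'.drop (a.toNat + 2), next', st.2.2 + 1)

def apply_swaps_py_alt (payload : String) (indices : List Int) : String :=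
  let chars := payload.toList
  let res := (PySem.List.sorted indices (fun x => x) false).foldl (pvStepB chars) ([], 0, 0)
  String.ofList (PySem.Chars.join [] (res.1 ++ (chars.drop res.2.1).map (fun c => [c])))

-- ===== PRECONDITION & SPEC =====
def Spec_apply_swaps_py (payload : String) (indices : List Int) (out : String) : Prop := out = apply_swaps_py_alt payload indices
instance (payload : String) (indices : List Int) (out : String) : Decidable (Spec_apply_swaps_py payload indices out) := by unfold Spec_apply_swaps_py; infer_instance

-- ===== CLAIM (what is proved, stated in full; the proofs are below) =====
def Claim_equal_apply_swaps_py : Prop := ∀ (payload : String) (indices : List Int), Dom_apply_swaps_py payload indices → Spec_apply_swaps_py payload indices (apply_swaps_py payload indices)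

-- ===== LEMMAS AND PROOFS =====

-- the loop invariant tying A's (working, swaps_done) to B's (out, next_i, done):
-- rendering A's list gives B's out followed by the not-yet-consumed payload chars
def pvInv (chars : List Char) (sA : List PVElem × Int)
    (sB : List (List Char) × Nat × Int) : Prop :=
  sA.1.map renderElem = sB.1 ++ (chars.drop sB.2.1).map (fun c => [c])
  ∧ sB.2.1 ≤ chars.length ∧ sA.2 = sB.2.2

lemma pvStep_inv (chars : List Char) (sA : List PVElem × Int)
    (sB : List (List Char) × Nat × Int) (i : Int) (h : pvInv chars sA sB) :
    pvInv chars (pvStepA sA i) (pvStepB chars sB i) := by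
  obtain ⟨w, d⟩ := sA
  obtain ⟨out, next, d'⟩ := sB
  obtain ⟨h1, hnext, hd⟩ := h
  simp only at h1 hnext hd
  subst hd
  have hlen : w.length = out.length + (chars.length - next) := by
    have := congrArg List.length h1
    simpa using this
  unfold pvStepA pvStepB
  simp only
  by_cases hg : i - d < 0 ∨ i - d ≥ (w.length : Int) - 1
  · rw [if_pos hg, if_pos (by omega)]
    exact ⟨h1, hnext, rfl⟩
  · rw [if_neg hg, if_neg (by omega)]
    push Not at hg
    obtain ⟨h0, hub⟩ := hg
    set a : Int := i - d with ha
    set aN : Nat := a.toNat with haN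
    have haZ : (aN : Int) = a := Int.toNat_of_nonneg h0
    have haw : aN + 2 ≤ w.length := by omega
    set need : Int := a + 2 - out.length with hneeddef
    set out' := if 0 < need then out ++ ((chars.drop next).take need.toNat).map (fun c => ([c] : List Char)) else out with hout'
    set next' := if 0 < need then next + need.toNat else next with hnext'
    have hrestlen : (chars.drop next).length = chars.length - next := by simp
    have hmain : w.map renderElem = out' ++ (chars.drop next').map (fun c => [c]) := by
      by_cases hp : 0 < need
      · rw [hout', hnext', if_pos hp, if_pos hp]
        rw [List.append_assoc, ← List.map_append, ← List.drop_drop, List.take_append_drop]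
        exact h1
      · rw [hout', hnext', if_neg hp, if_neg hp]
        exact h1
    have hout'len : aN + 2 ≤ out'.length := by
      by_cases hp : 0 < need
      · rw [hout', if_pos hp]
        simp only [List.length_append, List.length_map, List.length_take, hrestlen]
        omega
      · rw [hout', if_neg hp]
        omega
    have hnext'le : next' ≤ chars.length := by
      by_cases hp : 0 < need
      · rw [hnext', if_pos hp]; omega
      · rw [hnext', if_neg hp]; exact hnext
    -- element correspondence
    have hwlen2 : aN < w.length ∧ aN + 1 < w.length := by omega
    have hget : ∀ (j : Nat) (hj1 : j < out'.length) (hj2 : j < w.length),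
        out'[j] = renderElem w[j] := by
      intro j hj1 hj2
      have : (w.map renderElem)[j]'(by simpa using hj2) = (out' ++ (chars.drop next').map (fun c => [c]))[j]'(by rw [← hmain]; simpa using hj2) := by
        simp_rw [hmain]
      rw [List.getElem_append_left hj1] at this
      simpa using this.symm
    have ht1 : (a + 1).toNat = aN + 1 := by omega
    have hfa : PySem.List.pyGetD w a (.str []) = w[aN]'hwlen2.1 := by
      rw [PySem.List.pyGetD_eq_getElem w (.str []) h0 (by omega)]
    have hsa : PySem.List.pyGetD w (a + 1) (.str []) = w[aN + 1]'hwlen2.2 := by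
      rw [PySem.List.pyGetD_eq_getElem w (.str []) (by omega) (by omega)]
      congr 1
    have hfb : PySem.List.pyGetD out' a [] = renderElem (w[aN]'hwlen2.1) := by
      rw [PySem.List.pyGetD_eq_getElem out' [] h0 (by omega)]
      exact hget aN (by omega) hwlen2.1
    have hsb : PySem.List.pyGetD out' (a + 1) [] = renderElem (w[aN + 1]'hwlen2.2) := by
      rw [PySem.List.pyGetD_eq_getElem out' [] (by omega) (by omega)]
      simp only [ht1]
      exact hget (aN + 1) (by omega) hwlen2.2
    refine ⟨?_, hnext'le, rfl⟩
    simp only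
    rw [PySem.List.slice_to w h0, PySem.List.slice_from w (by omega : (0:Int) ≤ a + 2)]
    have h2 : (a + 2).toNat = aN + 2 := by omega
    rw [h2, hfa, hsa, hfb, hsb]
    simp only [List.map_append, List.map_take, List.map_drop, List.map_cons, List.map_nil]
    rw [hmain]
    rw [List.take_append_of_le_length (by omega), List.drop_append_of_le_length (by omega)]
    simp [renderElem, pvWrap, List.append_assoc]
    omega

lemma pvFold_inv (chars : List Char) (L : List Int) (sA : List PVElem × Int)
    (sB : List (List Char) × Nat × Int) (h : pvInv chars sA sB) :
    pvInv chars (L.foldl pvStepA sA) (L.foldl (pvStepB chars) sB) := by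
  induction L generalizing sA sB with
  | nil => exact h
  | cons x xs ih => exact ih _ _ (pvStep_inv chars sA sB x h)

-- ===== VERDICT (by name: the statement is the Claim_ definition above) =====
theorem apply_swaps_py_spec : Claim_equal_apply_swaps_py := by
  intro payload indices _
  unfold Spec_apply_swaps_py apply_swaps_py apply_swaps_py_alt
  have h := pvFold_inv payload.toList (PySem.List.sorted indices (fun x => x) false)
      (payload.toList.map (fun c => .str [c]), 0) ([], 0, 0) ?_
  · exact congrArg (fun l => String.ofList (PySem.Chars.join [] l)) h.1
  · refine ⟨?_, by simp, rfl⟩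
    simp [renderElem, List.map_map, Function.comp]
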